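-- pv_equiv track=rewrite | github.com/apexewe1-eng/app | solvers.py | get_neighbours_with_direction
-- ===== SOURCE A (Python) =====
-- from typing import Dict, List, Tuple, Any
--
-- State = Tuple[int, ...]
--
-- def get_neighbours_with_direction(state: State) -> List[Tuple[State, str]]:
--     neighbours = []
--     blank = state.index(0)
--     r, c = blank // 3, blank % 3
--     moves = [(-1, 0, "Up"), (1, 0, "Down"), (0, -1, "Left"), (0, 1, "Right")]
--
--     for dr, dc, move_name in moves:
--         nr, nc = r + dr, c + dc
--         if 0 <= nr < 3 and 0 <= nc < 3:
--             res = list(state)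
--             res[blank], res[nr * 3 + nc] = res[nr * 3 + nc], res[blank]
--             neighbours.append((tuple(res), move_name))
--     return neighbours
-- ===== SOURCE B (Python) =====
-- # B: table-driven neighbours — hardcoded adjacency of each blank cell to its
-- # (target index, direction) moves in A's Up/Down/Left/Right order; no grid arithmetic.
-- _MOVES = (
--     ((3, "Down"), (1, "Right")),
--     ((4, "Down"), (0, "Left"), (2, "Right")),
--     ((5, "Down"), (1, "Left")),
--     ((0, "Up"), (6, "Down"), (4, "Right")),
--     ((1, "Up"), (7, "Down"), (3, "Left"), (5, "Right")),
--     ((2, "Up"), (8, "Down"), (4, "Left")),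
--     ((3, "Up"), (7, "Right")),
--     ((4, "Up"), (6, "Left"), (8, "Right")),
--     ((5, "Up"), (7, "Left")),
-- )
--
-- def get_neighbours_with_direction(state):
--     blank = state.index(0)
--     neighbours = []
--     for target, name in _MOVES[blank]:
--         res = list(state)
--         res[blank], res[target] = res[target], res[blank]
--         neighbours.append((tuple(res), name))
--     return neighbours
-- ===== Notes on version B (the rewrite author's own statement) =====
-- stated objective: simpler
-- what changed: B replaces A's row/column arithmetic and per-move bounds checks by a hardcoded adjacency table mapping each blank index 0-8 to its in-grid (target, direction) moves in A's Up/Down/Left/Right order.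
import Mathlib
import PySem

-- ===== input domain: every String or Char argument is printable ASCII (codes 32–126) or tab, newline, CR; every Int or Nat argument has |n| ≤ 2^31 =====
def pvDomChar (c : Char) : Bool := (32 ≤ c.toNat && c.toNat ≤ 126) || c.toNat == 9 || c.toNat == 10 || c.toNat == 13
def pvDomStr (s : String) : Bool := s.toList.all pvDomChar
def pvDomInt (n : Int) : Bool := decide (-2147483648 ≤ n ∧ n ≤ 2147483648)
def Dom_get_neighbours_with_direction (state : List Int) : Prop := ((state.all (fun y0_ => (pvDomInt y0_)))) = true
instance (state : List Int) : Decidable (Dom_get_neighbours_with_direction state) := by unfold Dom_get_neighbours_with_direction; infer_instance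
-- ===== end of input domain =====

-- B replaces A's row/column arithmetic and bounds checks by a hardcoded adjacency table
-- from blank index to (target, direction) moves (objective: simpler).

-- shared helper: Python's 'res = list(state); res[i], res[j] = res[j], res[i]'
-- (both sources contain this identical swap snippet); none = IndexError
def pvSwap (xs : List Int) (i j : Int) : Option (List Int) :=
  match PySem.List.pyGet? xs i, PySem.List.pyGet? xs j with
  | some a, some b => some ((xs.set i.toNat b).set j.toNat a)
  | _, _ => none

-- ===== PORT A =====
def get_neighbours_with_direction (state : List Int) : List (List Int × String) :=
  match PySem.List.index? state 0 with
  | none => []  -- state.index(0) raises ValueError: excluded by Pre_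
  | some k =>
    let blank : Int := (k : Int)
    let r := PySem.Int.floordiv blank 3
    let c := PySem.Int.mod blank 3
    let moves : List (Int × Int × String) := [(-1, 0, "Up"), (1, 0, "Down"), (0, -1, "Left"), (0, 1, "Right")]
    moves.foldl (fun neighbours m =>
      let nr := r + m.1
      let nc := c + m.2.1
      if 0 ≤ nr ∧ nr < 3 ∧ 0 ≤ nc ∧ nc < 3 then
        match pvSwap state blank (nr * 3 + nc) with
        | some res => neighbours ++ [(res, m.2.2)]
        | none => neighbours  -- IndexError: excluded by Pre_
      else neighbours) []

-- ===== PORT B =====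
def pvTable : List (List (Int × String)) :=
  [ [(3, "Down"), (1, "Right")],
    [(4, "Down"), (0, "Left"), (2, "Right")],
    [(5, "Down"), (1, "Left")],
    [(0, "Up"), (6, "Down"), (4, "Right")],
    [(1, "Up"), (7, "Down"), (3, "Left"), (5, "Right")],
    [(2, "Up"), (8, "Down"), (4, "Left")],
    [(3, "Up"), (7, "Right")],
    [(4, "Up"), (6, "Left"), (8, "Right")],
    [(5, "Up"), (7, "Left")] ]

def get_neighbours_with_direction_alt (state : List Int) : List (List Int × String) :=
  match PySem.List.index? state 0 with
  | none => []  -- state.index(0) raises ValueError: excluded by Pre_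
  | some k =>
    let blank : Int := (k : Int)
    match PySem.List.pyGet? pvTable blank with
    | none => []  -- _MOVES[blank] raises IndexError: excluded by Pre_
    | some entries =>
      entries.foldl (fun neighbours e =>
        match pvSwap state blank e.1 with
        | some res => neighbours ++ [(res, e.2)]
        | none => neighbours) []

-- ===== PRECONDITION & SPEC =====
-- Pre_ requires: the board contains a blank (0) — else A raises ValueError — at an index k
-- inside the 3x3 grid (k < 9) with its in-grid swap targets k+3 / k+1 on the list — else A
-- raises IndexError; it excludes boards whose first 0 sits at index ≥ 9, where A's grid
-- arithmetic accidentally still returns an "Up" move for a cell outside the 3x3 board.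
def pvPreB (state : List Int) : Bool :=
  match List.idxOf? 0 state with
  | none => false
  | some k =>
    decide (k < 9) && (decide (6 ≤ k) || decide (k + 3 < state.length))
      && (decide (k % 3 = 2) || decide (k + 1 < state.length))
def Pre_get_neighbours_with_direction (state : List Int) : Prop :=
  pvPreB state = true
instance (state : List Int) : Decidable (Pre_get_neighbours_with_direction state) := by
  unfold Pre_get_neighbours_with_direction; infer_instance
def pvWitness_get_neighbours_with_direction : List Int := [1, 2, 3, 4, 0, 5, 6, 7, 8]

def Spec_get_neighbours_with_direction (state : List Int) (out : List (List Int × String)) : Prop := out = get_neighbours_with_direction_alt state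
instance (state : List Int) (out : List (List Int × String)) : Decidable (Spec_get_neighbours_with_direction state out) := by unfold Spec_get_neighbours_with_direction; infer_instance

-- ===== CLAIM (what is proved, stated in full; the proofs are below) =====
def Claim_equal_get_neighbours_with_direction : Prop := ∀ (state : List Int), Dom_get_neighbours_with_direction state → Pre_get_neighbours_with_direction state → Spec_get_neighbours_with_direction state (get_neighbours_with_direction state)

-- ===== LEMMAS AND PROOFS =====

theorem pv_core (state : List Int) (k : Nat) (hk : k < 9)
    (hidx : List.idxOf? 0 state = some k) :
    get_neighbours_with_direction state = get_neighbours_with_direction_alt state := by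
  interval_cases k <;>
    simp only [get_neighbours_with_direction, get_neighbours_with_direction_alt,
      PySem.List.index?_eq_idxOf?, hidx] <;> rfl

-- ===== VERDICT (by name: the statement is the Claim_ definition above) =====
theorem get_neighbours_with_direction_spec : Claim_equal_get_neighbours_with_direction := by
  intro state _ hpre
  unfold Pre_get_neighbours_with_direction pvPreB at hpre
  cases h : List.idxOf? 0 state with
  | none => rw [h] at hpre; simp at hpre
  | some k =>
    rw [h] at hpre
    simp only [Bool.and_eq_true, decide_eq_true_eq] at hpre
    exact pv_core state k hpre.1.1 h
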